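-- pv_equiv track=rewrite | github.com/HWeber-tech/emp_proving_ground_v1 | scripts/analysis/codemod_wave2.py | convert_generics
-- ===== SOURCE A (Python) =====
-- from typing import Tuple
--
-- GENERIC_MAP: dict[str, str] = {
--     "List[": "list[",
--     "Dict[": "dict[",
--     "Tuple[": "tuple[",
--     "Set[": "set[",
--     "FrozenSet[": "frozenset[",
--     # Note: We intentionally do NOT rewrite abstract/typing constructs like
--     # Sequence/Mapping/Iterable/etc. to avoid changing runtime semantics.
-- }
--
-- def convert_generics(text: str) -> Tuple[str, bool]:
--     """
--     Replace legacy typing generics (List/Dict/Tuple/Set/FrozenSet) with PEP 585 built-in generics.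
--     Does not touch abstract containers like Sequence/Mapping/etc.
--     """
--     changed = False
--     new_text = text
--     for old, newv in GENERIC_MAP.items():
--         if old in new_text:
--             new_text = new_text.replace(old, newv)
--             changed = True
--     return new_text, changed
-- ===== SOURCE B (Python) =====
-- from typing import Tuple
--
-- _PATTERNS = ("List[", "Dict[", "Tuple[", "Set[")
-- # "FrozenSet[" is deliberately absent: in A the "Set[" pass runs first and
-- # lowers the embedded "Set[", so "FrozenSet[" is never replaced as a whole.
--
-- def convert_generics(text: str) -> Tuple[str, bool]:
--     """Single left-to-right scan instead of five global replace passes."""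
--     parts = []
--     changed = False
--     i = 0
--     n = len(text)
--     while i < n:
--         for pat in _PATTERNS:
--             if text.startswith(pat, i):
--                 parts.append(pat.lower())
--                 i += len(pat)
--                 changed = True
--                 break
--         else:
--             parts.append(text[i])
--             i += 1
--     return "".join(parts), changed
-- ===== Notes on version B (the rewrite author's own statement) =====
-- stated objective: alternative
-- what changed: Replaces A's five sequential whole-text membership-test-plus-replace passes over GENERIC_MAP with a single left-to-right scan that matches the four effective prefixes (List[/Dict[/Tuple[/Set[) in place and lowercases them as it copies; FrozenSet[ is deliberately not matched whole because A's Set[ pass always fires first inside it.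
import Mathlib
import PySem

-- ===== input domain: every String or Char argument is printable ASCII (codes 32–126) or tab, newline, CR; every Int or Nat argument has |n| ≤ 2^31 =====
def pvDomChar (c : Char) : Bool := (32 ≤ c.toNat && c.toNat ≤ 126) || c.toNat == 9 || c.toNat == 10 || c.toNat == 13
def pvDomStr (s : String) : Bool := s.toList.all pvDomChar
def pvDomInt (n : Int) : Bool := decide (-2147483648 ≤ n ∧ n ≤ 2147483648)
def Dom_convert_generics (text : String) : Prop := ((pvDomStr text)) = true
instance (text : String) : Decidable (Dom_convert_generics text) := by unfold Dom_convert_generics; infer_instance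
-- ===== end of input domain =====

-- B replaces A's five whole-text replace passes by one left-to-right scan over the four
-- effective patterns (alternative algorithm, same result and changed flag).

set_option maxRecDepth 4096


-- ===== PORT A =====
-- literal port of A: fold the five GENERIC_MAP items in insertion order, each pass
-- doing `old in text` and then a global str.replace
-- the body of A's for-loop, named: one (old, new) item of GENERIC_MAP
def aStep (st : String × Bool) (ov : String × String) : String × Bool :=
  if PySem.Str.isIn ov.1 st.1 then (PySem.Str.replace st.1 ov.1 ov.2, true) else st

def convert_generics (text : String) : String × Bool :=
  ([("List[", "list["), ("Dict[", "dict["), ("Tuple[", "tuple["), ("Set[", "set["),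
    ("FrozenSet[", "frozenset[")] : List (String × String)).foldl aStep (text, false)

-- ===== PORT B =====
-- the four patterns of Source B's _PATTERNS tuple, and their lower-cased forms
abbrev pvPatL : List Char := ['L', 'i', 's', 't', '[']
abbrev pvPatD : List Char := ['D', 'i', 'c', 't', '[']
abbrev pvPatT : List Char := ['T', 'u', 'p', 'l', 'e', '[']
abbrev pvPatS : List Char := ['S', 'e', 't', '[']
abbrev pvLowL : List Char := ['l', 'i', 's', 't', '[']
abbrev pvLowD : List Char := ['d', 'i', 'c', 't', '[']
abbrev pvLowT : List Char := ['t', 'u', 'p', 'l', 'e', '[']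
abbrev pvLowS : List Char := ['s', 'e', 't', '[']

-- Source B's single while-loop scan, as the obvious structural recursion over the characters
def altScan : List Char → List Char × Bool
  | [] => ([], false)
  | c :: t =>
    if pvPatL.isPrefixOf (c :: t) then
      let r := altScan (t.drop 4); (pvLowL ++ r.1, true)
    else if pvPatD.isPrefixOf (c :: t) then
      let r := altScan (t.drop 4); (pvLowD ++ r.1, true)
    else if pvPatT.isPrefixOf (c :: t) then
      let r := altScan (t.drop 5); (pvLowT ++ r.1, true)
    else if pvPatS.isPrefixOf (c :: t) then
      let r := altScan (t.drop 3); (pvLowS ++ r.1, true)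
    else
      let r := altScan t; (c :: r.1, r.2)
  termination_by l => l.length
  decreasing_by
    all_goals (simp only [List.length_drop, List.length_cons]; omega)

def convert_generics_alt (text : String) : String × Bool :=
  let r := altScan text.toList
  (String.ofList r.1, r.2)

-- ===== PRECONDITION & SPEC =====
def Spec_convert_generics (text : String) (out : String × Bool) : Prop := out = convert_generics_alt text
instance (text : String) (out : String × Bool) : Decidable (Spec_convert_generics text out) := by unfold Spec_convert_generics; infer_instance

-- ===== CLAIM (what is proved, stated in full; the proofs are below) =====
def Claim_equal_convert_generics : Prop := ∀ (text : String), Dom_convert_generics text → Spec_convert_generics text (convert_generics text)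

-- ===== LEMMAS AND PROOFS =====

-- proof-side mirror of one global `s.replace(old, new)` pass (old nonempty)
def rep1 (p q : List Char) : List Char → List Char
  | [] => []
  | c :: t =>
    if p.isPrefixOf (c :: t) then q ++ rep1 p q (t.drop (p.length - 1))
    else c :: rep1 p q t
  termination_by l => l.length
  decreasing_by
    all_goals (simp only [List.length_drop, List.length_cons]; omega)

lemma rep1_nil (p q : List Char) : rep1 p q [] = [] := by rw [rep1.eq_def]

lemma rep1_pos (p q : List Char) (c : Char) (t : List Char) (h : p.isPrefixOf (c :: t) = true) :
    rep1 p q (c :: t) = q ++ rep1 p q (t.drop (p.length - 1)) := by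
  rw [rep1.eq_def]
  simp only
  rw [if_pos h]

lemma rep1_neg (p q : List Char) (c : Char) (t : List Char) (h : ¬ p.isPrefixOf (c :: t) = true) :
    rep1 p q (c :: t) = c :: rep1 p q t := by
  rw [rep1.eq_def]
  simp only
  rw [if_neg h]

-- the fuel loop of PySem.Chars.replace computes rep1
lemma go_eq (old new : List Char) (hold : old ≠ []) :
    ∀ fuel l acc, l.length ≤ fuel →
      PySem.Chars.replace.go old new fuel l acc = acc.reverse ++ rep1 old new l := by
  intro fuel
  induction fuel with
  | zero =>
    intro l acc hl
    have hnil : l = [] := List.length_eq_zero_iff.mp (Nat.le_zero.mp hl)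
    subst hnil
    rw [PySem.Chars.replace.go.eq_def, rep1_nil]
  | succ n ih =>
    intro l acc hl
    rw [PySem.Chars.replace.go.eq_def]
    match l with
    | [] => rw [rep1_nil]; simp
    | c :: t =>
      simp only
      by_cases hpre : old.isPrefixOf (c :: t) = true
      · rw [if_pos hpre, rep1_pos _ _ _ _ hpre]
        have hlen : (List.drop old.length (c :: t)).length ≤ n := by
          simp only [List.length_drop, List.length_cons] at *
          have : 1 ≤ old.length := by
            cases old with
            | nil => exact absurd rfl hold
            | cons a b => simp
          omega
        rw [ih _ _ hlen]
        have hd : List.drop old.length (c :: t) = t.drop (old.length - 1) := by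
          cases old with
          | nil => exact absurd rfl hold
          | cons a b => simp
        rw [hd]
        simp
      · rw [if_neg hpre, rep1_neg _ _ _ _ hpre]
        have hlen : t.length ≤ n := by
          simp only [List.length_cons] at hl; omega
        rw [ih _ _ hlen]
        simp

lemma replace_eq_rep1 (s old new : List Char) (h : old ≠ []) :
    PySem.Chars.replace s old new = rep1 old new s := by
  rw [PySem.Chars.replace, if_neg (by simp [h]), go_eq old new h s.length s [] le_rfl]
  simp

-- a pass whose pattern does not occur leaves the text unchanged
lemma rep1_id (p q : List Char) (_hp : p ≠ []) : ∀ x, ¬ p <:+: x → rep1 p q x = x := by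
  intro x
  induction x with
  | nil => intro _; exact rep1_nil p q
  | cons c t ih =>
    intro h
    have hpre : ¬ p.isPrefixOf (c :: t) = true := fun hb =>
      h (List.IsPrefix.isInfix (List.isPrefixOf_iff_prefix.mp hb))
    rw [rep1_neg _ _ _ _ hpre, ih (fun hi => h (List.infix_cons_iff.mpr (Or.inr hi)))]

-- a pass matches its own pattern at the head and continues after it
lemma rep1_append_self (p q z : List Char) (hp : p ≠ []) :
    rep1 p q (p ++ z) = q ++ rep1 p q z := by
  match p with
  | [] => exact absurd rfl hp
  | a :: b =>
    rw [List.cons_append, rep1_pos _ _ _ _ (List.isPrefixOf_iff_prefix.mpr ⟨z, by simp⟩)]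
    have : List.drop ((a :: b).length - 1) (b ++ z) = z := by
      simp only [List.length_cons, Nat.add_sub_cancel]
      exact List.drop_left
    rw [this]

-- a pass skips over any block of characters none of which is the pattern's head
lemma rep1_skip (ph : Char) (pt q : List Char) :
    ∀ u z, ph ∉ u → rep1 (ph :: pt) q (u ++ z) = u ++ rep1 (ph :: pt) q z := by
  intro u
  induction u with
  | nil => intro z _; simp
  | cons x u' ih =>
    intro z h
    have hpre : ¬ (ph :: pt).isPrefixOf (x :: (u' ++ z)) = true := by
      intro hb
      have hph : ph = x := (List.cons_prefix_cons.mp (List.isPrefixOf_iff_prefix.mp hb)).1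
      exact h (by rw [hph]; exact List.mem_cons_self)
    rw [List.cons_append, rep1_neg _ _ _ _ hpre, ih z (fun hm => h (List.mem_cons_of_mem _ hm))]
    simp

-- PREFIX TRANSFER: a probe w that cannot align with the replacement q and does not
-- contain the pattern's head is a prefix of the rewritten text iff it was one before.
lemma pt_aux (ph : Char) (pt q : List Char) :
    ∀ n (x w : List Char), x.length ≤ n →
      (∀ j, j < w.length → ¬ (w.drop j <+: q ∨ q <+: w.drop j)) →
      ph ∉ w →
      ((w <+: rep1 (ph :: pt) q x) ↔ (w <+: x)) := by
  intro n
  induction n with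
  | zero =>
    intro x w hx _ _
    have hnil : x = [] := List.length_eq_zero_iff.mp (Nat.le_zero.mp hx)
    subst hnil
    rw [rep1_nil]
  | succ n ih =>
    intro x w hx h1 h2
    match x with
    | [] => rw [rep1_nil]
    | c :: t =>
      by_cases hpre : (ph :: pt).isPrefixOf (c :: t) = true
      · rw [rep1_pos _ _ _ _ hpre]
        have hph : ph = c := (List.cons_prefix_cons.mp (List.isPrefixOf_iff_prefix.mp hpre)).1
        match w with
        | [] => simp
        | d :: w' =>
          apply iff_of_false
          · intro h
            rcases List.prefix_or_prefix_of_prefix h (List.prefix_append q _) with h' | h'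
            · exact h1 0 (by simp) (Or.inl (by simpa using h'))
            · exact h1 0 (by simp) (Or.inr (by simpa using h'))
          · intro h
            have hd : d = c := (List.cons_prefix_cons.mp h).1
            exact h2 (by rw [hph.trans hd.symm]; exact List.mem_cons_self)
      · rw [rep1_neg _ _ _ _ hpre]
        match w with
        | [] => simp
        | d :: w' =>
          rw [List.cons_prefix_cons, List.cons_prefix_cons]
          refine and_congr_right fun _ => ?_
          refine ih t w' (by simp only [List.length_cons] at hx; omega) ?_
            (fun hm => h2 (List.mem_cons_of_mem _ hm))
          intro j hj
          have := h1 (j + 1) (by simpa using Nat.succ_lt_succ hj)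
          simpa using this

-- an occurrence of w cannot start inside a block a it cannot align with
lemma infix_unappend (w : List Char) (_hw : w ≠ []) :
    ∀ a b, (∀ k, k < a.length → ¬ (w <+: a.drop k ∨ a.drop k <+: w)) →
      ((w <:+: a ++ b) ↔ (w <:+: b)) := by
  intro a
  induction a with
  | nil => intro b _; simp
  | cons x a' ih =>
    intro b h
    have hfalse : ¬ (w <+: x :: (a' ++ b)) := by
      intro hp
      have hp' : w <+: (x :: a') ++ b := by simpa using hp
      rcases List.prefix_or_prefix_of_prefix hp' (List.prefix_append (x :: a') b) with h' | h'
      · exact h 0 (by simp) (Or.inl (by simpa using h'))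
      · exact h 0 (by simp) (Or.inr (by simpa using h'))
    have hrec := ih b (fun k hk => by simpa using h (k + 1) (by simpa using Nat.succ_lt_succ hk))
    rw [List.cons_append, List.infix_cons_iff, hrec]
    simp [hfalse]

-- INFIX TRANSFER: under the same non-alignment conditions, w occurs in the rewritten
-- text iff it occurred in the original.
lemma inf_aux (ph : Char) (pt q : List Char) :
    ∀ n (x w : List Char), x.length ≤ n →
      (∀ j, j < w.length → ¬ (w.drop j <+: q ∨ q <+: w.drop j)) →
      (∀ k, k < q.length → ¬ (w <+: q.drop k ∨ q.drop k <+: w)) →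
      (∀ k, k < (ph :: pt).length → ¬ (w <+: (ph :: pt).drop k ∨ (ph :: pt).drop k <+: w)) →
      ph ∉ w →
      ((w <:+: rep1 (ph :: pt) q x) ↔ (w <:+: x)) := by
  intro n
  induction n with
  | zero =>
    intro x w hx _ _ _ _
    have hnil : x = [] := List.length_eq_zero_iff.mp (Nat.le_zero.mp hx)
    subst hnil
    rw [rep1_nil]
  | succ n ih =>
    intro x w hx h1 h2 h3 h4
    by_cases hw : w = []
    · subst hw; simp
    match x with
    | [] => rw [rep1_nil]
    | c :: t =>
      by_cases hpre : (ph :: pt).isPrefixOf (c :: t) = true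
      · rw [rep1_pos _ _ _ _ hpre]
        obtain ⟨hph, hpt⟩ := List.cons_prefix_cons.mp (List.isPrefixOf_iff_prefix.mp hpre)
        obtain ⟨u, hu⟩ := hpt
        have hdrop : t.drop ((ph :: pt).length - 1) = u := by
          rw [← hu]
          simp only [List.length_cons, Nat.add_sub_cancel]
          exact List.drop_left
        rw [hdrop]
        have hulen : u.length ≤ n := by
          have := congrArg List.length hu
          simp only [List.length_append, List.length_cons] at this hx
          omega
        rw [infix_unappend w hw q (rep1 (ph :: pt) q u) h2,
            ih u w hulen h1 h2 h3 h4]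
        have hx2 : c :: t = (ph :: pt) ++ u := by
          rw [List.cons_append, hu, hph]
        rw [hx2, infix_unappend w hw (ph :: pt) u h3]
      · rw [rep1_neg _ _ _ _ hpre, List.infix_cons_iff, List.infix_cons_iff]
        have hxlen : t.length ≤ n := by simp only [List.length_cons] at hx; omega
        refine or_congr ?_ (ih t w hxlen h1 h2 h3 h4)
        match w with
        | [] => simp
        | d :: w' =>
          rw [List.cons_prefix_cons, List.cons_prefix_cons]
          refine and_congr_right fun _ => ?_
          refine pt_aux ph pt q n t w' hxlen ?_ (fun hm => h4 (List.mem_cons_of_mem _ hm))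
          intro j hj
          have := h1 (j + 1) (by simpa using Nat.succ_lt_succ hj)
          simpa using this

-- ELIMINATION: after a pass no occurrence of its own pattern is left.
lemma elim_aux (ph : Char) (pt q : List Char)
    (e1 : ∀ j, j < pt.length → ¬ (pt.drop j <+: q ∨ q <+: pt.drop j))
    (e2 : ∀ k, k < q.length → ¬ ((ph :: pt) <+: q.drop k ∨ q.drop k <+: (ph :: pt)))
    (e4 : ph ∉ pt) :
    ∀ n x, x.length ≤ n → ¬ ((ph :: pt) <:+: rep1 (ph :: pt) q x) := by
  intro n
  induction n with
  | zero =>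
    intro x hx
    have hnil : x = [] := List.length_eq_zero_iff.mp (Nat.le_zero.mp hx)
    subst hnil
    rw [rep1_nil]
    intro h
    simpa using List.eq_nil_of_infix_nil h
  | succ n ih =>
    intro x hx
    match x with
    | [] =>
      rw [rep1_nil]
      intro h
      simpa using List.eq_nil_of_infix_nil h
    | c :: t =>
      by_cases hpre : (ph :: pt).isPrefixOf (c :: t) = true
      · rw [rep1_pos _ _ _ _ hpre]
        intro h
        have hlen : (t.drop ((ph :: pt).length - 1)).length ≤ n := by
          simp only [List.length_drop, List.length_cons] at *
          omega
        exact ih _ hlen ((infix_unappend (ph :: pt) (by simp) q _ e2).mp h)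
      · rw [rep1_neg _ _ _ _ hpre]
        intro h
        have hlen : t.length ≤ n := by simp only [List.length_cons] at hx; omega
        rcases List.infix_cons_iff.mp h with hp | hi
        · obtain ⟨hph, hw⟩ := List.cons_prefix_cons.mp hp
          have hpt : pt <+: t := (pt_aux ph pt q n t pt hlen e1 e4).mp hw
          exact hpre (List.isPrefixOf_iff_prefix.mpr (List.cons_prefix_cons.mpr ⟨hph, hpt⟩))
        · exact ih t hlen hi

-- the result of A's first four passes, and B's changed flag, at list level
def pvPipe (s : List Char) : List Char :=
  rep1 pvPatS pvLowS (rep1 pvPatT pvLowT (rep1 pvPatD pvLowD (rep1 pvPatL pvLowL s)))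

def pvFlags (s : List Char) : Bool :=
  PySem.Chars.isIn pvPatL s || PySem.Chars.isIn pvPatD s ||
  PySem.Chars.isIn pvPatT s || PySem.Chars.isIn pvPatS s

lemma isIn_cons_of_not_prefix (p : List Char) (c : Char) (t : List Char)
    (h : ¬ p <+: (c :: t)) : PySem.Chars.isIn p (c :: t) = PySem.Chars.isIn p t := by
  rcases hb : PySem.Chars.isIn p t with _ | _
  · rw [PySem.Chars.isIn_eq_false_iff] at hb ⊢
    intro hin
    rcases List.infix_cons_iff.mp hin with h' | h'
    · exact h h'
    · exact hb h'
  · rw [PySem.Chars.isIn_iff_infix] at hb ⊢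
    exact List.infix_cons_iff.mpr (Or.inr hb)

lemma isIn_true_of_prefix (p s : List Char) (h : p <+: s) : PySem.Chars.isIn p s = true :=
  (PySem.Chars.isIn_iff_infix p s).mpr (List.IsPrefix.isInfix h)

-- B's scan computes exactly the four-pass pipeline and the flag disjunction
lemma alt_eq : ∀ n s, s.length ≤ n → altScan s = (pvPipe s, pvFlags s) := by
  intro n
  induction n with
  | zero =>
    intro s hs
    have hnil : s = [] := List.length_eq_zero_iff.mp (Nat.le_zero.mp hs)
    subst hnil
    have h1 : pvPipe ([] : List Char) = [] := by
      simp [pvPipe, rep1_nil]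
    have h2 : pvFlags ([] : List Char) = false := by decide
    rw [h1, h2, altScan.eq_def]
  | succ n ih =>
    intro s hs
    match s with
    | [] =>
      have h1 : pvPipe ([] : List Char) = [] := by
        simp [pvPipe, rep1_nil]
      have h2 : pvFlags ([] : List Char) = false := by decide
      rw [h1, h2, altScan.eq_def]
    | c :: t =>
      by_cases hL : pvPatL.isPrefixOf (c :: t) = true
      · -- List[ at the head
        rw [altScan.eq_def]
        simp only
        rw [if_pos hL]
        obtain ⟨z, hz⟩ := List.isPrefixOf_iff_prefix.mp hL
        have hz' : 'L' :: (['i', 's', 't', '['] ++ z) = c :: t := hz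
        obtain ⟨hc, ht⟩ := List.cons.inj hz'
        have hzlen : z.length ≤ n := by
          have hlt := congrArg List.length ht
          simp only [List.length_append, List.length_cons] at hlt hs
          omega
        have hdz : t.drop 4 = z := by rw [← ht]; exact rfl
        rw [hdz, ih z hzlen]
        have hfst : pvPipe (c :: t) = pvLowL ++ pvPipe z := by
          rw [pvPipe, pvPipe, ← hz,
              rep1_append_self pvPatL pvLowL z (by decide),
              rep1_skip 'D' ['i', 'c', 't', '['] pvLowD pvLowL _ (by decide),
              rep1_skip 'T' ['u', 'p', 'l', 'e', '['] pvLowT pvLowL _ (by decide),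
              rep1_skip 'S' ['e', 't', '['] pvLowS pvLowL _ (by decide)]
        have hsnd : pvFlags (c :: t) = true := by
          rw [pvFlags, ← hz, isIn_true_of_prefix pvPatL _ (List.prefix_append _ _)]
          simp
        rw [hfst, hsnd]
      · by_cases hD : pvPatD.isPrefixOf (c :: t) = true
        ·
          rw [altScan.eq_def]
          simp only
          rw [if_neg hL, if_pos hD]
          obtain ⟨z, hz⟩ := List.isPrefixOf_iff_prefix.mp hD
          have hz' : 'D' :: (['i', 'c', 't', '['] ++ z) = c :: t := hz
          obtain ⟨hc, ht⟩ := List.cons.inj hz'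
          have hzlen : z.length ≤ n := by
            have hlt := congrArg List.length ht
            simp only [List.length_append, List.length_cons] at hlt hs
            omega
          have hdz : t.drop 4 = z := by rw [← ht]; exact rfl
          rw [hdz, ih z hzlen]
          have hfst : pvPipe (c :: t) = pvLowD ++ pvPipe z := by
            rw [pvPipe, pvPipe, ← hz,
                rep1_skip 'L' ['i', 's', 't', '['] pvLowL pvPatD _ (by decide),
                rep1_append_self pvPatD pvLowD _ (by decide),
                rep1_skip 'T' ['u', 'p', 'l', 'e', '['] pvLowT pvLowD _ (by decide),
                rep1_skip 'S' ['e', 't', '['] pvLowS pvLowD _ (by decide)]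
          have hsnd : pvFlags (c :: t) = true := by
            rw [pvFlags, ← hz, isIn_true_of_prefix pvPatD _ (List.prefix_append _ _)]
            simp
          rw [hfst, hsnd]
        · by_cases hT : pvPatT.isPrefixOf (c :: t) = true
          ·
            rw [altScan.eq_def]
            simp only
            rw [if_neg hL, if_neg hD, if_pos hT]
            obtain ⟨z, hz⟩ := List.isPrefixOf_iff_prefix.mp hT
            have hz' : 'T' :: (['u', 'p', 'l', 'e', '['] ++ z) = c :: t := hz
            obtain ⟨hc, ht⟩ := List.cons.inj hz'
            have hzlen : z.length ≤ n := by
              have hlt := congrArg List.length ht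
              simp only [List.length_append, List.length_cons] at hlt hs
              omega
            have hdz : t.drop 5 = z := by rw [← ht]; exact rfl
            rw [hdz, ih z hzlen]
            have hfst : pvPipe (c :: t) = pvLowT ++ pvPipe z := by
              rw [pvPipe, pvPipe, ← hz,
                  rep1_skip 'L' ['i', 's', 't', '['] pvLowL pvPatT _ (by decide),
                  rep1_skip 'D' ['i', 'c', 't', '['] pvLowD pvPatT _ (by decide),
                  rep1_append_self pvPatT pvLowT _ (by decide),
                  rep1_skip 'S' ['e', 't', '['] pvLowS pvLowT _ (by decide)]
            have hsnd : pvFlags (c :: t) = true := by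
              rw [pvFlags, ← hz, isIn_true_of_prefix pvPatT _ (List.prefix_append _ _)]
              simp
            rw [hfst, hsnd]
          · by_cases hS : pvPatS.isPrefixOf (c :: t) = true
            ·
              rw [altScan.eq_def]
              simp only
              rw [if_neg hL, if_neg hD, if_neg hT, if_pos hS]
              obtain ⟨z, hz⟩ := List.isPrefixOf_iff_prefix.mp hS
              have hz' : 'S' :: (['e', 't', '['] ++ z) = c :: t := hz
              obtain ⟨hc, ht⟩ := List.cons.inj hz'
              have hzlen : z.length ≤ n := by
                have hlt := congrArg List.length ht
                simp only [List.length_append, List.length_cons] at hlt hs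
                omega
              have hdz : t.drop 3 = z := by rw [← ht]; exact rfl
              rw [hdz, ih z hzlen]
              have hfst : pvPipe (c :: t) = pvLowS ++ pvPipe z := by
                rw [pvPipe, pvPipe, ← hz,
                    rep1_skip 'L' ['i', 's', 't', '['] pvLowL pvPatS _ (by decide),
                    rep1_skip 'D' ['i', 'c', 't', '['] pvLowD pvPatS _ (by decide),
                    rep1_skip 'T' ['u', 'p', 'l', 'e', '['] pvLowT pvPatS _ (by decide),
                    rep1_append_self pvPatS pvLowS _ (by decide)]
              have hsnd : pvFlags (c :: t) = true := by
                rw [pvFlags, ← hz, isIn_true_of_prefix pvPatS _ (List.prefix_append _ _)]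
                simp
              rw [hfst, hsnd]
            · -- no pattern at the head
              rw [altScan.eq_def]
              simp only
              rw [if_neg hL, if_neg hD, if_neg hT, if_neg hS]
              have hlen : t.length ≤ n := by simp only [List.length_cons] at hs; omega
              rw [ih t hlen]
              have hLp : ¬ pvPatL <+: (c :: t) := fun h => hL (List.isPrefixOf_iff_prefix.mpr h)
              have hDp : ¬ pvPatD <+: (c :: t) := fun h => hD (List.isPrefixOf_iff_prefix.mpr h)
              have hTp : ¬ pvPatT <+: (c :: t) := fun h => hT (List.isPrefixOf_iff_prefix.mpr h)
              have hSp : ¬ pvPatS <+: (c :: t) := fun h => hS (List.isPrefixOf_iff_prefix.mpr h)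
              have g1 : rep1 pvPatL pvLowL (c :: t) = c :: rep1 pvPatL pvLowL t :=
                rep1_neg _ _ _ _ hL
              have hD2 : ¬ pvPatD <+: (c :: rep1 pvPatL pvLowL t) := by
                rw [← g1]
                intro hcon
                exact hDp ((pt_aux 'L' ['i', 's', 't', '['] pvLowL (c :: t).length (c :: t)
                  pvPatD le_rfl (by decide) (by decide)).mp hcon)
              have g2 : rep1 pvPatD pvLowD (c :: rep1 pvPatL pvLowL t) =
                  c :: rep1 pvPatD pvLowD (rep1 pvPatL pvLowL t) :=
                rep1_neg _ _ _ _ (fun hb => hD2 (List.isPrefixOf_iff_prefix.mp hb))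
              have hT2 : ¬ pvPatT <+: (c :: rep1 pvPatD pvLowD (rep1 pvPatL pvLowL t)) := by
                rw [← g2, ← g1]
                intro hcon
                have s1 := (pt_aux 'D' ['i', 'c', 't', '['] pvLowD
                    (rep1 pvPatL pvLowL (c :: t)).length (rep1 pvPatL pvLowL (c :: t))
                    pvPatT le_rfl (by decide) (by decide)).mp hcon
                exact hTp ((pt_aux 'L' ['i', 's', 't', '['] pvLowL (c :: t).length (c :: t)
                  pvPatT le_rfl (by decide) (by decide)).mp s1)
              have g3 : rep1 pvPatT pvLowT (c :: rep1 pvPatD pvLowD (rep1 pvPatL pvLowL t)) =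
                  c :: rep1 pvPatT pvLowT (rep1 pvPatD pvLowD (rep1 pvPatL pvLowL t)) :=
                rep1_neg _ _ _ _ (fun hb => hT2 (List.isPrefixOf_iff_prefix.mp hb))
              have hS2 : ¬ pvPatS <+:
                  (c :: rep1 pvPatT pvLowT (rep1 pvPatD pvLowD (rep1 pvPatL pvLowL t))) := by
                rw [← g3, ← g2, ← g1]
                intro hcon
                have s1 := (pt_aux 'T' ['u', 'p', 'l', 'e', '['] pvLowT
                    (rep1 pvPatD pvLowD (rep1 pvPatL pvLowL (c :: t))).length
                    (rep1 pvPatD pvLowD (rep1 pvPatL pvLowL (c :: t)))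
                    pvPatS le_rfl (by decide) (by decide)).mp hcon
                have s2 := (pt_aux 'D' ['i', 'c', 't', '['] pvLowD
                    (rep1 pvPatL pvLowL (c :: t)).length (rep1 pvPatL pvLowL (c :: t))
                    pvPatS le_rfl (by decide) (by decide)).mp s1
                exact hSp ((pt_aux 'L' ['i', 's', 't', '['] pvLowL (c :: t).length (c :: t)
                  pvPatS le_rfl (by decide) (by decide)).mp s2)
              have g4 : rep1 pvPatS pvLowS
                    (c :: rep1 pvPatT pvLowT (rep1 pvPatD pvLowD (rep1 pvPatL pvLowL t))) =
                  c :: rep1 pvPatS pvLowS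
                    (rep1 pvPatT pvLowT (rep1 pvPatD pvLowD (rep1 pvPatL pvLowL t))) :=
                rep1_neg _ _ _ _ (fun hb => hS2 (List.isPrefixOf_iff_prefix.mp hb))
              have hfst : pvPipe (c :: t) = c :: pvPipe t := by
                rw [pvPipe, g1, g2, g3, g4, pvPipe]
              have hsnd : pvFlags (c :: t) = pvFlags t := by
                rw [pvFlags, pvFlags,
                    isIn_cons_of_not_prefix _ _ _ hLp,
                    isIn_cons_of_not_prefix _ _ _ hDp,
                    isIn_cons_of_not_prefix _ _ _ hTp,
                    isIn_cons_of_not_prefix _ _ _ hSp]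
              rw [hfst, hsnd]

-- one fold step of A, written uniformly
lemma stepA (s : String) (b : Bool) (o nw : String) (ho : o.toList ≠ []) :
    aStep (s, b) (o, nw) = (PySem.Str.replace s o nw, b || PySem.Str.isIn o s) := by
  show (if PySem.Str.isIn o s then (PySem.Str.replace s o nw, true) else (s, b)) = _
  by_cases h : PySem.Str.isIn o s = true
  · rw [if_pos h, h, Bool.or_true]
  · have hfalse : PySem.Str.isIn o s = false := Bool.eq_false_iff.mpr h
    have hinf : ¬ o.toList <:+: s.toList := by
      rw [PySem.Str.isIn_eq] at hfalse
      exact (PySem.Chars.isIn_eq_false_iff _ _).mp hfalse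
    have hrepl : PySem.Str.replace s o nw = s := by
      rw [← String.toList_inj, PySem.Str.toList_replace, replace_eq_rep1 _ _ _ ho,
          rep1_id _ _ ho _ hinf]
    rw [if_neg h, hfalse, hrepl, Bool.or_false]

-- infix transfer for A's `in` tests, at list level
lemma isIn_transfer (ph : Char) (pt q : List Char) (w s : List Char)
    (h1 : ∀ j, j < w.length → ¬ (w.drop j <+: q ∨ q <+: w.drop j))
    (h2 : ∀ k, k < q.length → ¬ (w <+: q.drop k ∨ q.drop k <+: w))
    (h3 : ∀ k, k < (ph :: pt).length → ¬ (w <+: (ph :: pt).drop k ∨ (ph :: pt).drop k <+: w))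
    (h4 : ph ∉ w) :
    PySem.Chars.isIn w (rep1 (ph :: pt) q s) = PySem.Chars.isIn w s := by
  rcases hb : PySem.Chars.isIn w s with _ | _
  · rw [PySem.Chars.isIn_eq_false_iff] at hb ⊢
    exact fun h => hb ((inf_aux ph pt q s.length s w le_rfl h1 h2 h3 h4).mp h)
  · rw [PySem.Chars.isIn_iff_infix] at hb ⊢
    exact (inf_aux ph pt q s.length s w le_rfl h1 h2 h3 h4).mpr hb

-- ===== VERDICT (by name: the statement is the Claim_ definition above) =====
theorem convert_generics_spec : Claim_equal_convert_generics := by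
  unfold Claim_equal_convert_generics Spec_convert_generics
  intro text _
  -- unfold A's fold into five uniform steps
  unfold convert_generics
  rw [List.foldl_cons, stepA _ _ _ _ (by decide),
      List.foldl_cons, stepA _ _ _ _ (by decide),
      List.foldl_cons, stepA _ _ _ _ (by decide),
      List.foldl_cons, stepA _ _ _ _ (by decide),
      List.foldl_cons, stepA _ _ _ _ (by decide),
      List.foldl_nil]
  -- move everything to the character-list level
  have hL : ("List[" : String).toList = pvPatL := by decide
  have hD : ("Dict[" : String).toList = pvPatD := by decide
  have hT : ("Tuple[" : String).toList = pvPatT := by decide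
  have hS : ("Set[" : String).toList = pvPatS := by decide
  have hF : ("FrozenSet[" : String).toList = ['F','r','o','z','e','n','S','e','t','['] := by decide
  have hLl : ("list[" : String).toList = pvLowL := by decide
  have hDl : ("dict[" : String).toList = pvLowD := by decide
  have hTl : ("tuple[" : String).toList = pvLowT := by decide
  have hSl : ("set[" : String).toList = pvLowS := by decide
  have e1 : (PySem.Str.replace text "List[" "list[").toList = rep1 pvPatL pvLowL text.toList := by
    rw [PySem.Str.toList_replace, replace_eq_rep1 _ _ _ (by decide), hL, hLl]
  have e2 : (PySem.Str.replace (PySem.Str.replace text "List[" "list[") "Dict[" "dict[").toList =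
      rep1 pvPatD pvLowD (rep1 pvPatL pvLowL text.toList) := by
    rw [PySem.Str.toList_replace, replace_eq_rep1 _ _ _ (by decide), hD, hDl, e1]
  have e3 : (PySem.Str.replace (PySem.Str.replace (PySem.Str.replace text "List[" "list[")
      "Dict[" "dict[") "Tuple[" "tuple[").toList =
      rep1 pvPatT pvLowT (rep1 pvPatD pvLowD (rep1 pvPatL pvLowL text.toList)) := by
    rw [PySem.Str.toList_replace, replace_eq_rep1 _ _ _ (by decide), hT, hTl, e2]
  have e4 : (PySem.Str.replace (PySem.Str.replace (PySem.Str.replace (PySem.Str.replace text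
      "List[" "list[") "Dict[" "dict[") "Tuple[" "tuple[") "Set[" "set[").toList =
      pvPipe text.toList := by
    rw [PySem.Str.toList_replace, replace_eq_rep1 _ _ _ (by decide), hS, hSl, e3, pvPipe]
  -- the Set[ pass has removed every Set[, hence every FrozenSet[
  have hnoS : ¬ pvPatS <:+: pvPipe text.toList := by
    rw [pvPipe]
    exact elim_aux 'S' ['e', 't', '['] pvLowS (by decide) (by decide) (by decide)
      (rep1 pvPatT pvLowT (rep1 pvPatD pvLowD (rep1 pvPatL pvLowL text.toList))).length _ le_rfl
  have hnoF : ¬ (['F','r','o','z','e','n','S','e','t','['] : List Char) <:+: pvPipe text.toList :=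
    fun h => hnoS (List.IsInfix.trans (by decide) h)
  -- the fifth pass is the identity and its `in` test is false
  have c5 : PySem.Str.isIn "FrozenSet[" (PySem.Str.replace (PySem.Str.replace (PySem.Str.replace
      (PySem.Str.replace text "List[" "list[") "Dict[" "dict[") "Tuple[" "tuple[")
      "Set[" "set[") = false := by
    rw [PySem.Str.isIn_eq, hF, e4]
    exact (PySem.Chars.isIn_eq_false_iff _ _).mpr hnoF
  have e5 : (PySem.Str.replace (PySem.Str.replace (PySem.Str.replace (PySem.Str.replace
      (PySem.Str.replace text "List[" "list[") "Dict[" "dict[") "Tuple[" "tuple[")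
      "Set[" "set[") "FrozenSet[" "frozenset[").toList = pvPipe text.toList := by
    rw [PySem.Str.toList_replace, replace_eq_rep1 _ _ _ (by decide), hF, e4,
        rep1_id _ _ (by decide) _ hnoF]
  -- B's side
  unfold convert_generics_alt
  rw [alt_eq text.toList.length text.toList le_rfl]
  -- compare the two pairs componentwise
  refine Prod.ext ?_ ?_
  · apply String.toList_inj.mp
    rw [e5]
    simp
  · show (_ : Bool) = pvFlags text.toList
    rw [c5, Bool.or_false]
    have f1 : PySem.Str.isIn "List[" text = PySem.Chars.isIn pvPatL text.toList := by
      rw [PySem.Str.isIn_eq, hL]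
    have f2 : PySem.Str.isIn "Dict[" (PySem.Str.replace text "List[" "list[") =
        PySem.Chars.isIn pvPatD text.toList := by
      rw [PySem.Str.isIn_eq, hD, e1,
          isIn_transfer 'L' ['i', 's', 't', '['] pvLowL pvPatD _
            (by decide) (by decide) (by decide) (by decide)]
    have f3 : PySem.Str.isIn "Tuple[" (PySem.Str.replace (PySem.Str.replace text "List[" "list[")
        "Dict[" "dict[") = PySem.Chars.isIn pvPatT text.toList := by
      rw [PySem.Str.isIn_eq, hT, e2,
          isIn_transfer 'D' ['i', 'c', 't', '['] pvLowD pvPatT _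
            (by decide) (by decide) (by decide) (by decide),
          isIn_transfer 'L' ['i', 's', 't', '['] pvLowL pvPatT _
            (by decide) (by decide) (by decide) (by decide)]
    have f4 : PySem.Str.isIn "Set[" (PySem.Str.replace (PySem.Str.replace (PySem.Str.replace text
        "List[" "list[") "Dict[" "dict[") "Tuple[" "tuple[") =
        PySem.Chars.isIn pvPatS text.toList := by
      rw [PySem.Str.isIn_eq, hS, e3,
          isIn_transfer 'T' ['u', 'p', 'l', 'e', '['] pvLowT pvPatS _
            (by decide) (by decide) (by decide) (by decide),
          isIn_transfer 'D' ['i', 'c', 't', '['] pvLowD pvPatS _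
            (by decide) (by decide) (by decide) (by decide),
          isIn_transfer 'L' ['i', 's', 't', '['] pvLowL pvPatS _
            (by decide) (by decide) (by decide) (by decide)]
    rw [f1, f2, f3, f4, pvFlags, Bool.false_or]
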